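-- pv_equiv track=rewrite | github.com/Algo-Study-haban/weekly-algorithm | 2주차/이연걸/표현가능한이진트리.py | solution
-- ===== SOURCE A (Python) =====
-- def solution(numbers):
--     answer = []
--
--     def recursive(bn):
--         n = len(bn)
--         mid = n // 2
--         if n < 3: return True
--         if bn[mid] == '0' and '1' in bn:
--             return False
--         return recursive(bn[ :mid]) and recursive(bn[mid + 1: ])
--
--     for n in numbers:
--         bn = bin(n)[2:]
--         bn_len = len(bn)
--
--         nodes = 1
--         while bn_len > nodes:
--             nodes <<= 1
--             nodes += 1
--
--         bn = '0'* (nodes - bn_len) + bn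
--         answer.append(1 if recursive(bn) else 0)
--
--     return answer
-- ===== SOURCE B (Python) =====
-- def _check(s, lo, hi):
--     # returns (representable, segment contains a '1')
--     if hi - lo == 1:
--         return True, s[lo] == '1'
--     mid = (lo + hi) // 2
--     ok_l, one_l = _check(s, lo, mid)
--     ok_r, one_r = _check(s, mid + 1, hi)
--     c = s[mid]
--     return (ok_l and ok_r and not (c == '0' and (one_l or one_r)),
--             one_l or one_r or c == '1')
--
--
-- def _representable(n):
--     s = bin(n)[2:]
--     size = 1
--     while size < len(s):
--         size = 2 * size + 1
--     s = '0' * (size - len(s)) + s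
--     ok, _ = _check(s, 0, size)
--     return 1 if ok else 0
--
--
-- def solution(numbers):
--     return [_representable(n) for n in numbers]
-- ===== Notes on version B (the rewrite author's own statement) =====
-- stated objective: alternative
-- what changed: Replaces the top-down slice-and-rescan recursion (building substring slices and scanning each for '1' at every node) by a single index-based bottom-up pass over the padded string that returns a (representable, has-a-one) pair per subtree, so no slices are built and no segment is rescanned.
import Mathlib
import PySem

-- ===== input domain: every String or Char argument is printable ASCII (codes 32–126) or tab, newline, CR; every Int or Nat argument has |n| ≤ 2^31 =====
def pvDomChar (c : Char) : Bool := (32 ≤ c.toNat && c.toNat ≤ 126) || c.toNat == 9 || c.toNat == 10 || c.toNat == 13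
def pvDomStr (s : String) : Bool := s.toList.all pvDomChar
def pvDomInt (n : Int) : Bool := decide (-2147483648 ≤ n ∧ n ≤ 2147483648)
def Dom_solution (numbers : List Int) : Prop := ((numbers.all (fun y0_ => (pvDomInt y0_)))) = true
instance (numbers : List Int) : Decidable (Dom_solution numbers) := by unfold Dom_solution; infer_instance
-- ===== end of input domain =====

-- B replaces A's top-down slice-and-rescan recursion by one index-based bottom-up pass
-- returning (representable, has-a-one) per subtree (alternative algorithm; same return value).

-- ===== PORT A =====
-- bin(m) digits for m > 0, most-significant first (empty for m = 0); shared by both ports,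
-- as both Pythons call the builtin bin(n)[2:]
def pvBinGo (m : Nat) : List Char :=
  if m = 0 then []
  else pvBinGo (m / 2) ++ [if m % 2 = 1 then '1' else '0']

-- bin(n)[2:] as a list of chars; for n < 0 Python yields 'b' ++ digits of |n| ('-0b101'[2:] = 'b101')
def pvBin (n : Int) : List Char :=
  if n < 0 then 'b' :: (if n.natAbs = 0 then ['0'] else pvBinGo n.natAbs)
  else if n.toNat = 0 then ['0'] else pvBinGo n.toNat

-- nodes = 1; while bn_len > nodes: nodes <<= 1; nodes += 1
def pvNodesLoop (bnLen nodes : Nat) : Nat :=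
  if bnLen > nodes then pvNodesLoop bnLen (2 * nodes + 1) else nodes
termination_by bnLen - nodes
decreasing_by omega

-- def recursive(bn): …  (bn[mid] is always in range when n ≥ 3, so getD's default is never used;
-- bn[:mid] / bn[mid+1:] with in-range nonnegative bounds are exactly take/drop)
def pvRecA (bn : List Char) : Bool :=
  let n := bn.length
  let mid := n / 2
  if n < 3 then true
  else if bn.getD mid ' ' = '0' ∧ '1' ∈ bn then false
  else pvRecA (bn.take mid) && pvRecA (bn.drop (mid + 1))
termination_by bn.length
decreasing_by
  · simp only [List.length_take]; omega
  · simp only [List.length_drop]; omega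

def pvItemA (n : Int) : Int :=
  let bn := pvBin n
  let bnLen := bn.length
  let nodes := pvNodesLoop bnLen 1
  let bn2 := List.replicate (nodes - bnLen) '0' ++ bn
  if pvRecA bn2 then 1 else 0

def solution (numbers : List Int) : List Int :=
  numbers.foldl (fun answer n => answer ++ [pvItemA n]) []

-- ===== PORT B =====
-- while size < len(s): size = 2 * size + 1
def pvSizeLoop (len size : Nat) : Nat :=
  if size < len then pvSizeLoop len (2 * size + 1) else size
termination_by len - size
decreasing_by omega

-- _check(s, lo, hi); indices are always in range and hi - lo ≥ 1 on reachable calls, so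
-- getD's default is never used (the '≤ 1' guard only makes the recursion total; Python tests 'hi - lo == 1')
def pvCheck (s : List Char) (lo hi : Nat) : Bool × Bool :=
  if hi - lo ≤ 1 then (true, s.getD lo ' ' == '1')
  else
    let mid := (lo + hi) / 2
    let l := pvCheck s lo mid
    let r := pvCheck s (mid + 1) hi
    let c := s.getD mid ' '
    (l.1 && r.1 && !(c == '0' && (l.2 || r.2)), l.2 || r.2 || c == '1')
termination_by hi - lo
decreasing_by all_goals omega

def pvRepresentable (n : Int) : Int :=
  let s := pvBin n
  let size := pvSizeLoop s.length 1
  let s2 := List.replicate (size - s.length) '0' ++ s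
  if (pvCheck s2 0 size).1 then 1 else 0

def solution_alt (numbers : List Int) : List Int :=
  numbers.map pvRepresentable

-- ===== PRECONDITION & SPEC =====
def Spec_solution (numbers : List Int) (out : List Int) : Prop := out = solution_alt numbers
instance (numbers : List Int) (out : List Int) : Decidable (Spec_solution numbers out) := by unfold Spec_solution; infer_instance

-- ===== CLAIM (what is proved, stated in full; the proofs are below) =====
def Claim_equal_solution : Prop := ∀ (numbers : List Int), Dom_solution numbers → Spec_solution numbers (solution numbers)

-- ===== LEMMAS AND PROOFS =====

theorem pvBeqOne (c : Char) : (c == '1') = decide ('1' = c) := by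
  by_cases h : c = '1'
  · subst h; decide
  · have h' : ¬ ('1' = c) := fun e => h e.symm
    simp [h, h']

theorem pvSizeLoop_eq (L s : Nat) : pvSizeLoop L s = pvNodesLoop L s := by
  by_cases h : s < L
  · rw [pvSizeLoop, pvNodesLoop, if_pos h, if_pos h]
    exact pvSizeLoop_eq L (2 * s + 1)
  · rw [pvSizeLoop, pvNodesLoop, if_neg h, if_neg h]
termination_by L - s
decreasing_by omega

theorem pvNodesLoop_spec (L n j : Nat) (hj : 1 ≤ j) (hn : n = 2 ^ j - 1) :
    ∃ k, 1 ≤ k ∧ pvNodesLoop L n = 2 ^ k - 1 ∧ L ≤ pvNodesLoop L n := by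
  by_cases h : L > n
  · rw [pvNodesLoop, if_pos h]
    have h1 : 1 ≤ 2 ^ j := Nat.one_le_two_pow
    have h2 : 2 ^ (j + 1) = 2 * 2 ^ j := by ring
    exact pvNodesLoop_spec L (2 * n + 1) (j + 1) (by omega) (by omega)
  · rw [pvNodesLoop, if_neg h]
    exact ⟨j, hj, hn, by omega⟩
termination_by L - n
decreasing_by all_goals omega

-- the heart of the equivalence: on a full-tree-sized segment, B's single pass computes
-- exactly (A's recursive check of that segment, whether the segment contains a '1')
theorem pvCheck_eq (k : Nat) (s : List Char) (lo : Nat) (hk : 1 ≤ k)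
    (hlen : lo + (2 ^ k - 1) ≤ s.length) :
    pvCheck s lo (lo + (2 ^ k - 1)) =
      (pvRecA ((s.drop lo).take (2 ^ k - 1)),
       decide ('1' ∈ (s.drop lo).take (2 ^ k - 1))) := by
  induction k generalizing lo with
  | zero => omega
  | succ k' ih =>
    by_cases hk1 : k' = 0
    · subst hk1
      have hlo : lo < s.length := by simp at hlen; omega
      have hd : s.drop lo = s[lo] :: s.drop (lo + 1) := List.drop_eq_getElem_cons hlo
      have hs : (s.drop lo).take (2 ^ 1 - 1) = [s[lo]] := by
        rw [hd, show (2 : Nat) ^ 1 - 1 = 1 from rfl, List.take_succ_cons, List.take_zero]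
      rw [pvCheck, if_pos (by omega)]
      rw [hs]
      have hrec : pvRecA [s[lo]] = true := by
        rw [pvRecA]; simp
      rw [hrec]
      have hgd : s.getD lo ' ' = s[lo] := List.getD_eq_getElem s ' ' hlo
      rw [hgd]
      simp [pvBeqOne]
    · -- step: k' ≥ 1, segment length 2 ^ (k' + 1) - 1 ≥ 3
      have hp : 2 ^ (k' + 1) = 2 * 2 ^ k' := by ring
      have h2k : 2 ≤ 2 ^ k' := by
        calc 2 = 2 ^ 1 := by norm_num
        _ ≤ 2 ^ k' := Nat.pow_le_pow_right (by omega) (by omega)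
      rw [pvCheck, if_neg (by omega)]
      have hmid : (lo + (lo + (2 ^ (k' + 1) - 1))) / 2 = lo + (2 ^ k' - 1) := by omega
      rw [hmid]
      simp only []
      have hL := ih lo (by omega) (by omega)
      rw [hL]
      have e1 : lo + (2 ^ k' - 1) + 1 = lo + 2 ^ k' := by omega
      have e2 : lo + (2 ^ (k' + 1) - 1) = lo + 2 ^ k' + (2 ^ k' - 1) := by omega
      rw [e1, e2]
      have hR := ih (lo + 2 ^ k') (by omega) (by omega)
      rw [hR]
      -- names for the three chunks
      have hmidlt : lo + (2 ^ k' - 1) < s.length := by omega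
      have hslen : ((s.drop lo).take (2 ^ (k' + 1) - 1)).length = 2 ^ (k' + 1) - 1 := by
        simp; omega
      have hgd : s.getD (lo + (2 ^ k' - 1)) ' ' = s[lo + (2 ^ k' - 1)] :=
        List.getD_eq_getElem s ' ' hmidlt
      have hsl : ((s.drop lo).take (2 ^ (k' + 1) - 1)).take (2 ^ k' - 1)
          = (s.drop lo).take (2 ^ k' - 1) := by
        rw [List.take_take]; congr 1; omega
      have hsr : ((s.drop lo).take (2 ^ (k' + 1) - 1)).drop (2 ^ k' - 1 + 1)
          = (s.drop (lo + 2 ^ k')).take (2 ^ k' - 1) := by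
        rw [List.drop_take, List.drop_drop,
          show lo + (2 ^ k' - 1 + 1) = lo + 2 ^ k' from by omega,
          show 2 ^ (k' + 1) - 1 - (2 ^ k' - 1 + 1) = 2 ^ k' - 1 from by omega]
      have hsplit : (s.drop lo).take (2 ^ (k' + 1) - 1)
          = (s.drop lo).take (2 ^ k' - 1)
            ++ s[lo + (2 ^ k' - 1)] :: (s.drop (lo + 2 ^ k')).take (2 ^ k' - 1) := by
        have hdropm : ((s.drop lo).take (2 ^ (k' + 1) - 1)).drop (2 ^ k' - 1)
            = s[lo + (2 ^ k' - 1)]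
              :: ((s.drop lo).take (2 ^ (k' + 1) - 1)).drop (2 ^ k' - 1 + 1) := by
          rw [List.drop_eq_getElem_cons (by rw [hslen]; omega)]
          congr 1
          simp [List.getElem_take, List.getElem_drop]
        conv_lhs => rw [← List.take_append_drop (2 ^ k' - 1)
          ((s.drop lo).take (2 ^ (k' + 1) - 1))]
        rw [hsl, hdropm, hsr]
      have hgd2 : ((s.drop lo).take (2 ^ (k' + 1) - 1)).getD (2 ^ k' - 1) ' '
          = s[lo + (2 ^ k' - 1)] := by
        rw [List.getD_eq_getElem _ _ (by rw [hslen]; omega)]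
        simp [List.getElem_take, List.getElem_drop]
      -- unfold the A-side recursion once, on the big chunk only
      have hA : pvRecA ((s.drop lo).take (2 ^ (k' + 1) - 1))
          = (if s[lo + (2 ^ k' - 1)] = '0' ∧
                ('1' ∈ (s.drop lo).take (2 ^ (k' + 1) - 1)) then false
             else pvRecA ((s.drop lo).take (2 ^ k' - 1)) &&
                  pvRecA ((s.drop (lo + 2 ^ k')).take (2 ^ k' - 1))) := by
        conv_lhs => rw [pvRecA]
        simp only [hslen]
        rw [if_neg (by omega), show (2 ^ (k' + 1) - 1) / 2 = 2 ^ k' - 1 from by omega]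
        rw [hgd2, hsl, hsr]
      rw [hA, hgd]
      -- case on the root char and the two has-one flags
      by_cases hc0 : s[lo + (2 ^ k' - 1)] = '0' <;>
        by_cases hc1 : s[lo + (2 ^ k' - 1)] = '1' <;>
        by_cases h1 : '1' ∈ (s.drop lo).take (2 ^ k' - 1) <;>
        by_cases h2 : '1' ∈ (s.drop (lo + 2 ^ k')).take (2 ^ k' - 1) <;>
        simp [hsplit, hc0, hc1, h1, h2, pvBeqOne]

theorem pvItem_eq (n : Int) : pvItemA n = pvRepresentable n := by
  unfold pvItemA pvRepresentable
  simp only []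
  rw [pvSizeLoop_eq]
  obtain ⟨k, hk1, hke, hkge⟩ := pvNodesLoop_spec (pvBin n).length 1 1 le_rfl (by norm_num)
  have hplen : (List.replicate (pvNodesLoop (pvBin n).length 1 - (pvBin n).length) '0'
      ++ pvBin n).length = pvNodesLoop (pvBin n).length 1 := by
    simp only [List.length_append, List.length_replicate]
    omega
  have hchk := pvCheck_eq k _ 0 hk1 (le_of_le_of_eq (by omega) hplen.symm)
  rw [show (0 : Nat) + (2 ^ k - 1) = pvNodesLoop (pvBin n).length 1 from by omega] at hchk
  rw [hchk, List.drop_zero, List.take_of_length_le (by rw [hplen]; omega)]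

-- ===== VERDICT (by name: the statement is the Claim_ definition above) =====
theorem solution_spec : Claim_equal_solution := by
  unfold Claim_equal_solution
  intro numbers _hdom
  unfold Spec_solution solution solution_alt
  rw [PySem.List.foldl_append_singleton_eq_map]
  exact List.map_congr_left fun n _ => pvItem_eq n
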